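-- pv_equiv track=rewrite | github.com/Sona-py/ACA-python-2 | week2/homework2.py | all_sums
-- ===== SOURCE A (Python) =====
-- def all_sums(a):
--     pairs=[]
--     n=list(range(1,a))
--     for i in n:
--         j=a-i
--         if j in n:
--             pairs.append((i,j))
--     pairs1 = [i for n, i in enumerate(pairs) if i[::-1] not in pairs[:n]]
--     return pairs1
-- ===== SOURCE B (Python) =====
-- def all_sums(a):
--     return [(i, a - i) for i in range(1, a // 2 + 1)]
-- ===== Notes on version B (the rewrite author's own statement) =====
-- stated objective: faster
-- what changed: Replaced the quadratic build (a membership scan of the whole range per element, then a quadratic reverse-dedup pass over prefixes) by one direct comprehension that emits each pair (i, a-i) once, for i from one up to half of a.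
import Mathlib
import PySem

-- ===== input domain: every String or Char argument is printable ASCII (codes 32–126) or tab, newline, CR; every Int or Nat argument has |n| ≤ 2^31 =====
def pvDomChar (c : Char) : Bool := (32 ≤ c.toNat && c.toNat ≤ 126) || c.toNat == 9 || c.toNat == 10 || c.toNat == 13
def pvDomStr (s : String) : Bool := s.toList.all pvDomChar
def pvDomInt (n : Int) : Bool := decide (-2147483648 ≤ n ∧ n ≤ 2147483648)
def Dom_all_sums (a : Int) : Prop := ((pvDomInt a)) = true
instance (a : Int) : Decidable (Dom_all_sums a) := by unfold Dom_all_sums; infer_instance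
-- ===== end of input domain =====

-- B replaces A's quadratic build-and-dedup (membership scan per i, then a reverse-dedup
-- pass over all prefixes) with one direct loop emitting (i, a-i) for i up to half of a; objective: faster.

-- ===== PORT A =====
-- pairs loop, then the comprehension over enumerate(pairs) with the prefix test;
-- i[::-1] on a 2-tuple is exactly the swapped pair (q.2, q.1).
def all_sums (a : Int) : List (Int × Int) :=
  let n := PySem.List.pyRange 1 a 1
  let pairs := n.foldl (fun pairs i => if (a - i) ∈ n then pairs ++ [(i, a - i)] else pairs) []
  ((PySem.List.enumerate pairs 0).filter
      (fun q => !decide ((q.2.2, q.2.1) ∈ PySem.List.slice pairs none (some q.1)))).map (·.2)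

-- ===== PORT B =====
def all_sums_alt (a : Int) : List (Int × Int) :=
  (PySem.List.pyRange 1 (PySem.Int.floordiv a 2 + 1) 1).map (fun i => (i, a - i))

-- ===== PRECONDITION & SPEC =====
def Spec_all_sums (a : Int) (out : List (Int × Int)) : Prop := out = all_sums_alt a
instance (a : Int) (out : List (Int × Int)) : Decidable (Spec_all_sums a out) := by unfold Spec_all_sums; infer_instance

-- ===== CLAIM (what is proved, stated in full; the proofs are below) =====
def Claim_equal_all_sums : Prop := ∀ (a : Int), Dom_all_sums a → Spec_all_sums a (all_sums a)

-- ===== LEMMAS AND PROOFS =====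

-- A's append-if fold, when the guard holds on every element, is just map.
theorem pvFoldlIfAll {α β : Type} (P : α → Prop) [DecidablePred P] (f : α → β) (xs : List α)
    (h : ∀ x ∈ xs, P x) (acc : List β) :
    xs.foldl (fun acc i => if P i then acc ++ [f i] else acc) acc = acc ++ xs.map f := by
  induction xs generalizing acc with
  | nil => simp
  | cons x xs ih => simp_all

theorem pvEnumerateAppend {α : Type} (xs ys : List α) (s : Int) :
    PySem.List.enumerate (xs ++ ys) s
      = PySem.List.enumerate xs s ++ PySem.List.enumerate ys (s + xs.length) := by
  induction xs generalizing s with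
  | nil => simp [PySem.List.enumerate]
  | cons x xs ih =>
      simp [PySem.List.enumerate_cons, ih, add_assoc, add_comm 1 (xs.length : Int)]

theorem pvEnumerateRangeMap {α : Type} (g : Nat → α) (N : Nat) :
    PySem.List.enumerate ((List.range N).map g) 0
      = (List.range N).map (fun (k : Nat) => ((k : Int), g k)) := by
  induction N with
  | zero => simp
  | succ n ih =>
      rw [List.range_succ, List.map_append, pvEnumerateAppend, ih, List.map_append]
      simp [PySem.List.enumerate_cons, PySem.List.enumerate]

theorem pvRangeFilterLt (M N : Nat) :
    (List.range N).filter (fun k => decide (k < M)) = List.range (min M N) := by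
  induction N with
  | zero => simp
  | succ n ih =>
      rw [List.range_succ, List.filter_append, ih]
      by_cases h : n < M
      · have : min M (n + 1) = min M n + 1 := by omega
        rw [this, List.range_succ]
        have : min M n = n := by omega
        simp [h, this]
      · have : min M (n + 1) = min M n := by omega
        simp [h, this]

theorem all_sums_eq (a : Int) : all_sums a = all_sums_alt a := by
  have h2 : (0 : Int) < 2 := by norm_num
  set N : Nat := (a - 1).toNat with hN
  set M : Nat := (PySem.Int.floordiv a 2).toNat with hM
  set g : Nat → Int × Int := fun k => ((1 : Int) + k, a - (1 + (k : Int))) with hg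
  have hMN : M ≤ N := by
    rw [hM, hN, PySem.Int.floordiv_eq_ediv_of_pos h2]; omega
  -- B side
  have hB : all_sums_alt a = (List.range M).map g := by
    rw [all_sums_alt, PySem.List.pyRange_one, List.map_map]
    have he : (PySem.Int.floordiv a 2 + 1 - 1).toNat = M := by rw [hM]; omega
    rw [he]; rfl
  -- A side: the pairs-building loop is a plain map (its guard always holds)
  have hall : ∀ x ∈ PySem.List.pyRange 1 a 1, (a - x) ∈ PySem.List.pyRange 1 a 1 := by
    intro x hx
    rw [PySem.List.mem_pyRange_one] at hx ⊢
    omega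
  have hpairs : (PySem.List.pyRange 1 a 1).foldl
      (fun pairs i => if (a - i) ∈ PySem.List.pyRange 1 a 1 then pairs ++ [(i, a - i)] else pairs) []
      = (List.range N).map g := by
    rw [pvFoldlIfAll (fun i => (a - i) ∈ PySem.List.pyRange 1 a 1) (fun i => (i, a - i))
          (PySem.List.pyRange 1 a 1) hall []]
    rw [List.nil_append, PySem.List.pyRange_one, List.map_map]
    rw [hN]; rfl
  -- the dedup filter keeps exactly the first M positions
  have hcond : ∀ k ∈ List.range N,
      ((fun q => !decide ((q.2.2, q.2.1) ∈
          PySem.List.slice ((List.range N).map g) none (some q.1))) ∘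
        (fun (k : Nat) => ((k : Int), g k))) k = decide (k < M) := by
    intro k hk
    rw [List.mem_range] at hk
    have hkN : (k : Int) < a - 1 := by omega
    simp only [Function.comp]
    have hslice : PySem.List.slice ((List.range N).map g) none (some (k : Int))
        = ((List.range N).map g).take ((k : Int)).toNat :=
      PySem.List.slice_to _ (Int.natCast_nonneg k)
    have htk : ((k : Int)).toNat = k := by omega
    rw [hslice, htk, ← List.map_take, List.take_range]
    have hmin : min k N = k := by omega
    rw [hmin]
    simp only [Bool.not_eq_eq_eq_not, List.mem_map, List.mem_range, hg]
    rw [hM, PySem.Int.floordiv_eq_ediv_of_pos h2]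
    rw [show (!decide (k < (a / 2).toNat)) = decide (¬ k < (a / 2).toNat) from by
          rw [← decide_not],
        decide_eq_decide]
    constructor
    · rintro ⟨m, hmk, heq⟩
      simp only [Prod.mk.injEq] at heq
      omega
    · intro h
      refine ⟨(a - 2 - k).toNat, by omega, ?_⟩
      simp only [Prod.mk.injEq]
      constructor <;> omega
  -- put the pieces together
  simp only [all_sums]
  rw [hpairs, pvEnumerateRangeMap, List.filter_map, List.filter_congr hcond,
      pvRangeFilterLt, hB]
  have hm : min M N = M := by omega
  rw [hm, List.map_map]
  simp

-- ===== VERDICT (by name: the statement is the Claim_ definition above) =====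
theorem all_sums_spec : Claim_equal_all_sums := by
  intro a _
  exact all_sums_eq a
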